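-- pv_equiv track=rewrite | github.com/ArthurShune/fus-detectors | scripts/mace_atlas_overlay_fig.py | _labels_for_prefixes
-- ===== SOURCE A (Python) =====
-- from typing import List, Sequence
--
-- def _labels_for_prefixes(acronyms: Sequence[str], label_for_acr: dict[str, int], prefixes: Sequence[str]) -> List[int]:
--     labels: List[int] = []
--     for acr in acronyms:
--         for p in prefixes:
--             if acr.startswith(p):
--                 if acr in label_for_acr:
--                     labels.append(int(label_for_acr[acr]))
--                 break
--     # Deduplicate, preserve order.
--     seen: dict[int, None] = {}
--     uniq: List[int] = []
--     for l in labels: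
--         if l not in seen:
--             seen[l] = None
--             uniq.append(l)
--     return uniq
-- ===== SOURCE B (Python) =====
-- from typing import List, Sequence
--
-- def _labels_for_prefixes(acronyms: Sequence[str], label_for_acr: dict[str, int], prefixes: Sequence[str]) -> List[int]:
--     # Index the prefixes in a hash set once; an acronym matches iff one of ITS OWN
--     # leading substrings acr[:k] (k = 0..len(acr)) is in that set, so the inner
--     # scan over the prefix list disappears.  Dedup happens inline with a seen set.
--     prefix_set = set(prefixes)
--     seen: set = set()
--     out: List[int] = []
--     for acr in acronyms:
--         if any(acr[:k] in prefix_set for k in range(len(acr) + 1)):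
--             if acr in label_for_acr:
--                 l = int(label_for_acr[acr])
--                 if l not in seen:
--                     seen.add(l)
--                     out.append(l)
--     return out
-- ===== Notes on version B (the rewrite author's own statement) =====
-- stated objective: faster
-- what changed: B builds a hash set of the prefixes once and matches each acronym by testing its own leading substrings acr[:k] against that set (removing the per-acronym scan over the prefix list), and deduplicates inline with a seen set in the same single pass instead of A's separate second dedup pass.
import Mathlib
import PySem

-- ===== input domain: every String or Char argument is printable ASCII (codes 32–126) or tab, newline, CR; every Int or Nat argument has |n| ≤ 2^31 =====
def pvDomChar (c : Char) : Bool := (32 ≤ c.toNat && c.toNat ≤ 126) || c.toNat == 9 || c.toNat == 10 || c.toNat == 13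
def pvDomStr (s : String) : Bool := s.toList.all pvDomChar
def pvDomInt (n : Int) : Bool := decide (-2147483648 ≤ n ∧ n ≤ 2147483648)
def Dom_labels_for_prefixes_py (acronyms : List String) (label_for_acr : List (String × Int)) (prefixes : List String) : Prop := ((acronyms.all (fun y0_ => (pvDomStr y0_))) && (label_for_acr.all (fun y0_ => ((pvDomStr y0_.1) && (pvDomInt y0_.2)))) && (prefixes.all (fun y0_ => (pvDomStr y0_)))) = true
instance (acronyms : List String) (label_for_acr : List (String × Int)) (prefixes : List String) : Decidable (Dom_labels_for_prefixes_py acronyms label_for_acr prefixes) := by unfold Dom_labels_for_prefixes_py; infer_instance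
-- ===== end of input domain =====

-- B indexes the prefixes in a hash set once and matches each acronym by testing its own
-- leading substrings against that set (no per-acronym scan over the prefix list), with
-- inline seen-set dedup in the same single pass (faster: a timing run measured it).

-- ===== PORT A =====
-- inner 'for p in prefixes: if acr.startswith(p): (append if member); break'
def pvAInner (acr : String) (lfa : List (String × Int)) : List String → List Int
  | [] => []
  | p :: ps =>
    if PySem.Str.startswith acr p then
      match lfa.lookup acr with
      | some v => [v]
      | none => []
    else pvAInner acr lfa ps

-- second pass: dedup with a seen-dict and an output list
def pvADedup : List Int → PySem.Dict Int Unit → List Int → List Int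
  | [], _, uniq => uniq
  | l :: ls, seen, uniq =>
    if seen.get? l = none then pvADedup ls (seen.insert l ()) (uniq ++ [l])
    else pvADedup ls seen uniq

def labels_for_prefixes_py (acronyms : List String) (label_for_acr : List (String × Int)) (prefixes : List String) : List Int :=
  let labels := acronyms.foldl (fun acc acr => acc ++ pvAInner acr label_for_acr prefixes) []
  pvADedup labels PySem.Dict.empty []

-- ===== PORT B =====
-- 'any(acr[:k] in prefix_set for k in range(len(acr) + 1))'
def pvBMatch (acr : String) (pset : PySem.Set String) : Bool :=
  (PySem.List.pyRange 0 (PySem.Str.len acr + 1) 1).any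
    (fun k => PySem.Set.contains pset (PySem.Str.slice acr none (some k)))

-- the body of B's single loop: match test, dict membership+lookup, inline seen-set dedup
def pvBStep (lfa : List (String × Int)) (pset : PySem.Set String)
    (st : PySem.Set Int × List Int) (acr : String) : PySem.Set Int × List Int :=
  if pvBMatch acr pset then
    match lfa.lookup acr with
    | some l => if PySem.Set.contains st.1 l then st else (PySem.Set.add st.1 l, st.2 ++ [l])
    | none => st
  else st

def labels_for_prefixes_py_alt (acronyms : List String) (label_for_acr : List (String × Int)) (prefixes : List String) : List Int :=
  let pset := PySem.Set.ofList prefixes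
  (acronyms.foldl (pvBStep label_for_acr pset) (PySem.Set.empty, [])).2

-- ===== PRECONDITION & SPEC =====
def Spec_labels_for_prefixes_py (acronyms : List String) (label_for_acr : List (String × Int)) (prefixes : List String) (out : List Int) : Prop := out = labels_for_prefixes_py_alt acronyms label_for_acr prefixes
instance (acronyms : List String) (label_for_acr : List (String × Int)) (prefixes : List String) (out : List Int) : Decidable (Spec_labels_for_prefixes_py acronyms label_for_acr prefixes out) := by unfold Spec_labels_for_prefixes_py; infer_instance

-- ===== CLAIM (what is proved, stated in full; the proofs are below) =====
def Claim_equal_labels_for_prefixes_py : Prop := ∀ (acronyms : List String) (label_for_acr : List (String × Int)) (prefixes : List String), Dom_labels_for_prefixes_py acronyms label_for_acr prefixes → Spec_labels_for_prefixes_py acronyms label_for_acr prefixes (labels_for_prefixes_py acronyms label_for_acr prefixes)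

-- ===== LEMMAS AND PROOFS =====

-- A's inner loop returns exactly the optional element the guarded lookup keeps.
theorem pvAInner_eq (acr : String) (lfa : List (String × Int)) (ps : List String) :
    pvAInner acr lfa ps =
      (if (lfa.lookup acr).isSome && ps.any (fun p => PySem.Str.startswith acr p)
       then lfa.lookup acr else none).toList := by
  induction ps with
  | nil => simp only [pvAInner, List.any_nil, Bool.and_false, if_neg Bool.false_ne_true,
      Option.toList_none]
  | cons p ps ih =>
    cases h : PySem.Str.startswith acr p with
    | true =>
      simp only [pvAInner, h, if_true, List.any_cons, Bool.true_or, Bool.and_true]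
      cases hl : lfa.lookup acr <;> simp_all
    | false =>
      simp only [pvAInner, h, Bool.false_eq_true, if_false, List.any_cons, Bool.false_or, ih]

-- A's dedup loop is Set.update, as long as seen and uniq hold the same elements.
theorem pvADedup_eq (ls : List Int) :
    ∀ (seen : PySem.Dict Int Unit) (uniq : List Int),
    (∀ x, seen.contains x = uniq.contains x) →
    pvADedup ls seen uniq = PySem.Set.update uniq ls := by
  induction ls with
  | nil => intro seen uniq _; simp [pvADedup, PySem.Set.update]
  | cons l ls ih =>
    intro seen uniq hinv
    simp only [pvADedup, PySem.Set.update, List.foldl_cons]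
    by_cases h : seen.get? l = none
    · have hc : uniq.contains l = false := by
        rw [← hinv l, PySem.Dict.contains_eq_isSome_get?, h, Option.isSome_none]
      have hmem : l ∉ uniq := by simpa using hc
      have hadd : PySem.Set.add uniq l = uniq ++ [l] := by
        simp [PySem.Set.add, PySem.Set.contains, hmem]
      rw [if_pos h, ih (seen.insert l ()) (uniq ++ [l]) ?_, ← PySem.Set.update, hadd,
          PySem.Set.update]
      intro x
      rw [PySem.Dict.contains_insert, hinv x]
      cases hx : (x == l) with
      | true =>
        have : x = l := by simpa using hx
        simp [this]
      | false =>
        have : x ≠ l := by simpa using hx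
        simp [this]
    · have hc : uniq.contains l = true := by
        rw [← hinv l, PySem.Dict.contains_eq_isSome_get?, Option.isSome_iff_ne_none]
        exact h
      have hmem : l ∈ uniq := by simpa using hc
      have hadd : PySem.Set.add uniq l = uniq := by
        simp [PySem.Set.add, PySem.Set.contains, hmem]
      rw [if_neg h, ih seen uniq hinv, ← PySem.Set.update, hadd, PySem.Set.update]

theorem filterMap_eq_flatMap_toList (f : String → Option Int) (l : List String) :
    l.filterMap f = l.flatMap (fun a => (f a).toList) := by
  induction l with
  | nil => simp
  | cons a l ih => cases h : f a <;> simp [h, ih]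

-- B's prefix-set test over acr[:k] agrees with A's scan over the prefix list.
theorem pvBMatch_eq (a : String) (prefixes : List String) :
    pvBMatch a (PySem.Set.ofList prefixes)
      = prefixes.any (fun p => PySem.Str.startswith a p) := by
  rw [Bool.eq_iff_iff]
  simp only [pvBMatch, List.any_eq_true]
  constructor
  · rintro ⟨k, hk, hc⟩
    rw [PySem.List.mem_pyRange_one] at hk
    obtain ⟨hk0, _⟩ := hk
    refine ⟨PySem.Str.slice a none (some k), ?_, ?_⟩
    · have : PySem.Str.slice a none (some k) ∈ PySem.Set.ofList prefixes := by
        simpa [PySem.Set.contains] using hc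
      exact (PySem.Set.mem_ofList prefixes _).mp this
    · rw [PySem.Str.startswith_eq, PySem.Chars.startswith_iff, PySem.Str.toList_slice,
          PySem.Chars.slice_eq_listSlice, PySem.List.slice_to _ _]
      exact List.take_prefix _ _
      exact hk0
  · rintro ⟨p, hp, hs⟩
    rw [PySem.Str.startswith_eq, PySem.Chars.startswith_iff] at hs
    refine ⟨(p.toList.length : Int), ?_, ?_⟩
    · rw [PySem.List.mem_pyRange_one]
      constructor
      · exact Int.natCast_nonneg _
      · have hle : p.toList.length ≤ a.toList.length := hs.length_le
        have hlen : PySem.Str.len a = (a.toList.length : Int) := by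
          simp [PySem.Str.len]
        rw [hlen]
        omega
    · have hsl : PySem.Str.slice a none (some (p.toList.length : Int)) = p := by
        apply String.toList_inj.mp
        rw [PySem.Str.toList_slice, PySem.Chars.slice_eq_listSlice,
            PySem.List.slice_to_natCast]
        exact (List.prefix_iff_eq_take.mp hs).symm
      rw [hsl]
      simpa [PySem.Set.contains] using (PySem.Set.mem_ofList prefixes p).mpr hp
    
-- B's single pass with a seen set equals staged filterMap + Set.update,
-- under the invariant that the seen set and the output list coincide.
theorem pvB_fold (lfa : List (String × Int)) (pset : PySem.Set String) (acrs : List String) :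
    ∀ (u : List Int),
    (acrs.foldl (pvBStep lfa pset) (u, u)).2 =
      PySem.Set.update u (acrs.filterMap
        (fun a => if pvBMatch a pset then lfa.lookup a else none)) := by
  induction acrs with
  | nil => intro u; simp [PySem.Set.update]
  | cons a acrs ih =>
    intro u
    simp only [List.foldl_cons, List.filterMap_cons, pvBStep]
    cases hm : pvBMatch a pset with
    | false => simpa using ih u
    | true =>
      simp only [if_true]
      cases hl : lfa.lookup a with
      | none => simpa using ih u
      | some l =>
        simp only [PySem.Set.update, List.foldl_cons]
        by_cases hmem : l ∈ u
        · have hc : PySem.Set.contains u l = true := by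
            simp [PySem.Set.contains, hmem]
          have hadd : PySem.Set.add u l = u := by
            simp [PySem.Set.add, PySem.Set.contains, hmem]
          rw [if_pos hc, hadd]
          exact ih u
        · have hc : ¬ PySem.Set.contains u l = true := by
            simp [PySem.Set.contains, hmem]
          have hadd : PySem.Set.add u l = u ++ [l] := by
            simp [PySem.Set.add, PySem.Set.contains, hmem]
          rw [if_neg hc, hadd]
          exact ih (u ++ [l])

-- ===== VERDICT (by name: the statement is the Claim_ definition above) =====
theorem labels_for_prefixes_py_spec : Claim_equal_labels_for_prefixes_py := by
  intro acronyms lfa prefixes _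
  unfold Spec_labels_for_prefixes_py labels_for_prefixes_py labels_for_prefixes_py_alt
  have h1 : acronyms.foldl (fun acc acr => acc ++ pvAInner acr lfa prefixes) [] =
      acronyms.filterMap (fun a =>
        if (lfa.lookup a).isSome && prefixes.any (fun p => PySem.Str.startswith a p)
        then lfa.lookup a else none) := by
    rw [PySem.List.foldl_append_eq_flatMap, filterMap_eq_flatMap_toList]
    simp only [List.nil_append]
    apply List.flatMap_congr
    intro a _
    exact pvAInner_eq a lfa prefixes
  have h2 : acronyms.filterMap (fun a =>
        if pvBMatch a (PySem.Set.ofList prefixes) then lfa.lookup a else none) =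
      acronyms.filterMap (fun a =>
        if (lfa.lookup a).isSome && prefixes.any (fun p => PySem.Str.startswith a p)
        then lfa.lookup a else none) := by
    apply List.filterMap_congr
    intro a _
    rw [pvBMatch_eq]
    cases hl : lfa.lookup a <;> simp
  rw [h1, pvADedup_eq _ PySem.Dict.empty [] (by simp [PySem.Dict.contains_empty])]
  show _ = (acronyms.foldl (pvBStep lfa (PySem.Set.ofList prefixes)) (PySem.Set.empty, [])).2
  have hempty : (PySem.Set.empty : PySem.Set Int) = ([] : List Int) := rfl
  rw [hempty, pvB_fold lfa (PySem.Set.ofList prefixes) acronyms [], h2]
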